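-- pv_equiv track=rewrite | github.com/felipmartins/github-profile-evaluator | evaluator/profile_handler.py | has_email
-- ===== SOURCE A (Python) =====
-- def has_email(sidebar, readme):
--     providers = [
--                  "@gmail.com", "@hotmail.com",
--                  "@outlook.com", "@yahoo.com",
--                  "@yahoo.com.br", "@terra.com.br",
--                  "@live.com", "@icloud.com"
--                  ]
--
--     if sidebar is None and readme is None:
--         return False
--     elif sidebar is None and readme is not None:
--         return any([email in readme.lower() for email in providers])
--     elif sidebar is not None and readme is None:
--         return any([email in sidebar.lower() for email in providers])
--
--     return any([email in readme.lower() for email in providers]) or any([email in sidebar.lower() for email in providers])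
-- ===== SOURCE B (Python) =====
-- PROVIDERS = ("@gmail.com", "@hotmail.com",
--              "@outlook.com", "@yahoo.com",
--              "@yahoo.com.br", "@terra.com.br",
--              "@live.com", "@icloud.com")
--
--
-- def has_email(sidebar, readme):
--     # Anchor-based scan: instead of testing 'p in text' for each provider,
--     # walk the lowercased text once, and only at '@' anchors try to match
--     # each provider as a prefix starting at that position.
--     def scan(text):
--         t = text.lower()
--         for i, ch in enumerate(t):
--             if ch == '@' and any(t.startswith(p, i) for p in PROVIDERS):
--                 return True
--         return False
--
--     return any(scan(t) for t in (sidebar, readme) if t is not None)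
-- ===== Notes on version B (the rewrite author's own statement) =====
-- stated objective: alternative
-- what changed: Replaces A's per-provider whole-text substring tests ('p in text' for each provider, with four-way None branching) by a single left-to-right scan of each lowercased text that stops only at '@' anchor characters and there tries each provider as a prefix at that position; correct because every provider starts with '@'.
import Mathlib
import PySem

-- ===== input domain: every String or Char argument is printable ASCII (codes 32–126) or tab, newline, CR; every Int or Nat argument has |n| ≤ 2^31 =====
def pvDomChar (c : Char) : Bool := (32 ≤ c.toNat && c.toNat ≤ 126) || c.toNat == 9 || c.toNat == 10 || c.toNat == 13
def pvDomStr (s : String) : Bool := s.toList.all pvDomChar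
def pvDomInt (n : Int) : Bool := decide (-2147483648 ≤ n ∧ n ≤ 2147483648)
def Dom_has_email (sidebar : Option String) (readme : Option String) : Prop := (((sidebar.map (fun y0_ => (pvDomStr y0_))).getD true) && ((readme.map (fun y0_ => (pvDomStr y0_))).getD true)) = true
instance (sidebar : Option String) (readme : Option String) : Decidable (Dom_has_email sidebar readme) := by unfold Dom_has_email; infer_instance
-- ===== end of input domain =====

-- B replaces the per-provider whole-text substring tests by one left-to-right scan of each
-- lowercased text that tries the providers as prefixes only at '@' anchors (objective: alternative).

def pvProviders : List String :=
  ["@gmail.com", "@hotmail.com",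
   "@outlook.com", "@yahoo.com",
   "@yahoo.com.br", "@terra.com.br",
   "@live.com", "@icloud.com"]

-- ===== PORT A =====
def has_email (sidebar : Option String) (readme : Option String) : Bool :=
  if sidebar = none ∧ readme = none then
    false
  else if sidebar = none ∧ readme ≠ none then
    (pvProviders.map (fun email => PySem.Str.isIn email (PySem.Str.lower (readme.getD "")))).any id
  else if sidebar ≠ none ∧ readme = none then
    (pvProviders.map (fun email => PySem.Str.isIn email (PySem.Str.lower (sidebar.getD "")))).any id
  else
    ((pvProviders.map (fun email => PySem.Str.isIn email (PySem.Str.lower (readme.getD "")))).any id)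
      || ((pvProviders.map (fun email => PySem.Str.isIn email (PySem.Str.lower (sidebar.getD "")))).any id)

-- ===== PORT B =====
-- the for-loop with early return in Source B's scan: walk the text, try providers only at '@'
def scanChars : List Char → Bool
  | [] => false
  | c :: rest =>
      (c == '@' && pvProviders.any (fun p => p.toList.isPrefixOf (c :: rest))) || scanChars rest

def has_email_alt (sidebar : Option String) (readme : Option String) : Bool :=
  ([sidebar, readme].filterMap id).any (fun t => scanChars (PySem.Chars.lower t.toList))

-- ===== PRECONDITION & SPEC =====
def Spec_has_email (sidebar : Option String) (readme : Option String) (out : Bool) : Prop := out = has_email_alt sidebar readme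
instance (sidebar : Option String) (readme : Option String) (out : Bool) : Decidable (Spec_has_email sidebar readme out) := by unfold Spec_has_email; infer_instance

-- ===== CLAIM =====
def Claim_equal_has_email : Prop := ∀ (sidebar : Option String) (readme : Option String), Dom_has_email sidebar readme → Spec_has_email sidebar readme (has_email sidebar readme)

-- ===== LEMMAS AND PROOFS =====

lemma isIn_cons (p : List Char) (c : Char) (rest : List Char) :
    PySem.Chars.isIn p (c :: rest) = (p.isPrefixOf (c :: rest) || PySem.Chars.isIn p rest) := by
  apply Bool.eq_iff_iff.mpr
  simp [PySem.Chars.isIn_iff_infix, List.infix_cons_iff, List.isPrefixOf_iff_prefix]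

lemma any_congr_mem {α : Type} {l : List α} {f g : α → Bool}
    (h : ∀ x ∈ l, f x = g x) : l.any f = l.any g := by
  induction l with
  | nil => rfl
  | cons x xs ih =>
      simp only [List.any_cons, h x (List.mem_cons_self), ih (fun y hy => h y (List.mem_cons_of_mem x hy))]

lemma any_or_split {α : Type} (l : List α) (f g : α → Bool) :
    l.any (fun x => f x || g x) = (l.any f || l.any g) := by
  induction l with
  | nil => rfl
  | cons x xs ih => simp only [List.any_cons, ih]; cases f x <;> cases g x <;> simp

-- the anchor is sound: every provider begins with '@', so prefix matches only happen at '@'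
lemma scan_eq (t : List Char) :
    scanChars t = pvProviders.any (fun p => PySem.Chars.isIn p.toList t) := by
  induction t with
  | nil => decide
  | cons c rest ih =>
    have hsplit : pvProviders.any (fun p => PySem.Chars.isIn p.toList (c :: rest))
        = (pvProviders.any (fun p => p.toList.isPrefixOf (c :: rest))
            || pvProviders.any (fun p => PySem.Chars.isIn p.toList rest)) := by
      rw [← any_or_split]
      apply any_congr_mem
      intro p _
      exact isIn_cons p.toList c rest
    rw [hsplit, scanChars, ih]
    by_cases hc : c = '@'
    · simp [hc]
    · have hpre : pvProviders.any (fun p => p.toList.isPrefixOf (c :: rest)) = false := by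
        apply List.any_eq_false.mpr
        intro p hp
        fin_cases hp <;>
          simp [List.isPrefixOf, show ('@' == c) = false from by
            simp [beq_eq_false_iff_ne]; exact fun h => hc h.symm]
      simp [hpre]

-- ===== VERDICT =====
theorem has_email_spec : Claim_equal_has_email := by
  intro sidebar readme _
  unfold Spec_has_email has_email has_email_alt
  cases sidebar with
  | none =>
    cases readme with
    | none => decide
    | some r => simp [scan_eq]
  | some s =>
    cases readme with
    | none => simp [scan_eq]
    | some r => simp [scan_eq, Bool.or_comm]
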